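-- pv_equiv track=rewrite | github.com/juschei/cubesolver | src/util/parsing.py | remove_all_Y
-- ===== SOURCE A (Python) =====
-- Y_map = {
--     "R": "B",
--     "R'": "B'",
--     "L": "F",
--     "L'": "F'",
--     "F": "R",
--     "F'": "R'",
--     "B": "L",
--     "B'": "L'",
-- }
--
-- def map_Y(move: str, y_count: int):
--     """
--     move: the move to be mapped, allowed values: "R", "R'", "L", "L'", "F", "F'", "B", "B'" (the other moves are not affected by Y)
--     y_count: the number of Y moves that have been performed before the move
--
--     maps each move that depends on the Y-orientation to the corresponding move without a Y being performed first
--     """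
--     if move in Y_map:
--         y_count %= 4
--         if y_count == 4:
--             return move
--         else:
--             # compose map access in Y_map y_count times
--             for _ in range(y_count):
--                 move = Y_map[move]
--         return move
--     return move
--
-- def remove_all_Y(moves: list[str]) -> list[str]:
--     """
--     moves: list of moves to be parsed
--     """
--
--     new_moves = []
--     y_count = 0
--     for move in moves:
--         if move == "Y":
--             y_count += 1
--         elif move == "Y'":
--             y_count -= 1
--         else:
--             new_moves.append(map_Y(move, y_count))
--
--     return new_moves
-- ===== SOURCE B (Python) =====
-- def remove_all_Y(moves):
--     CYCLE = "RBLF"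
--     new_moves = []
--     y_count = 0
--     for move in moves:
--         if move == "Y":
--             y_count += 1
--         elif move == "Y'":
--             y_count -= 1
--         elif move and move[0] in CYCLE and move[1:] in ("", "'"):
--             i = CYCLE.index(move[0])
--             new_moves.append(CYCLE[(i + y_count) % 4] + move[1:])
--         else:
--             new_moves.append(move)
--     return new_moves
-- ===== Notes on version B (the rewrite author's own statement) =====
-- stated objective: simpler
-- what changed: map_Y's inner loop that applies the Y_map dict y_count%4 times is replaced by a closed-form modular index into the 4-cycle RBLF (face split from its trailing prime), leaving the Y-counting scan unchanged.
import Mathlib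
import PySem

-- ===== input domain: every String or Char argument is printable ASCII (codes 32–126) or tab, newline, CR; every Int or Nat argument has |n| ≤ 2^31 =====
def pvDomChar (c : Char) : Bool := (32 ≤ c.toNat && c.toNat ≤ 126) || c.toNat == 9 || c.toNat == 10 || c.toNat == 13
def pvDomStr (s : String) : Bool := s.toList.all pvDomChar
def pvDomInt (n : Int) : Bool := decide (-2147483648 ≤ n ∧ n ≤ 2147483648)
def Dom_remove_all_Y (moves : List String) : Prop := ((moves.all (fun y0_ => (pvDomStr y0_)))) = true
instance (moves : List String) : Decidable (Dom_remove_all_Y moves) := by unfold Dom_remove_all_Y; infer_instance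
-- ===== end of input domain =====

-- B replaces the Y_map dict iterated y_count times by a closed-form modular index into the
-- 4-cycle "RBLF" (objective: simpler — one arithmetic step instead of an inner loop).

-- ===== PORT A =====
def Ymap : PySem.Dict String String :=
  PySem.Dict.ofList [("R","B"),("R'","B'"),("L","F"),("L'","F'"),("F","R"),("F'","R'"),("B","L"),("B'","L'")]

-- Y_map[move] inside the guard 'move in Y_map' never raises (keys closed under the map); getD is exact there
def mapY (move : String) (y_count : Int) : String :=
  if (Ymap.get? move).isSome then
    let y := PySem.Int.mod y_count 4
    if y = 4 then move
    else (PySem.List.pyRange 0 y 1).foldl (fun mv _ => (Ymap.get? mv).getD mv) move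
  else move

def remove_all_Y (moves : List String) : List String :=
  (moves.foldl (fun (st : List String × Int) move =>
    if move = "Y" then (st.1, st.2 + 1)
    else if move = "Y'" then (st.1, st.2 - 1)
    else (st.1 ++ [mapY move st.2], st.2)) ([], 0)).1

-- ===== PORT B =====
def mapY_alt (move : String) (y_count : Int) : String :=
  let cycle : List Char := ['R', 'B', 'L', 'F']
  match move.toList with
  | f :: rest =>
    if f ∈ cycle ∧ (rest = [] ∨ rest = ['\'']) then
      let i : Int := ((PySem.List.index? cycle f).getD 0 : Nat)
      String.ofList (((PySem.List.pyGet? cycle (PySem.Int.mod (i + y_count) 4)).getD f) :: rest)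
    else move
  | [] => move

def remove_all_Y_alt (moves : List String) : List String :=
  (moves.foldl (fun (st : List String × Int) move =>
    if move = "Y" then (st.1, st.2 + 1)
    else if move = "Y'" then (st.1, st.2 - 1)
    else (st.1 ++ [mapY_alt move st.2], st.2)) ([], 0)).1

-- ===== PRECONDITION & SPEC =====
def Spec_remove_all_Y (moves : List String) (out : List String) : Prop := out = remove_all_Y_alt moves
instance (moves : List String) (out : List String) : Decidable (Spec_remove_all_Y moves out) := by unfold Spec_remove_all_Y; infer_instance

-- ===== CLAIM (what is proved, stated in full; the proofs are below) =====
def Claim_equal_remove_all_Y : Prop := ∀ (moves : List String), Dom_remove_all_Y moves → Spec_remove_all_Y moves (remove_all_Y moves)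

-- ===== LEMMAS AND PROOFS =====

-- the 8 literal-key cases, each for the four possible values of y % 4
lemma mapY_eq_lit (m : String)
    (hm : m ∈ (["R","R'","L","L'","F","F'","B","B'"] : List String)) (y : Int) :
    mapY m y = mapY_alt m y := by
  have hmod : ∀ a : Int, PySem.Int.mod a 4 = a % 4 :=
    fun a => PySem.Int.mod_eq_emod_of_pos (by norm_num)
  have hk : y % 4 = 0 ∨ y % 4 = 1 ∨ y % 4 = 2 ∨ y % 4 = 3 := by omega
  fin_cases hm <;>
    rcases hk with hk | hk | hk | hk <;>
    · simp only [mapY, mapY_alt, hmod,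
        show ∀ i : Int, (i + y) % 4 = (i + y % 4) % 4 from fun i => by omega, hk]
      decide

lemma mapY_eq (m : String) (y : Int) : mapY m y = mapY_alt m y := by
  by_cases h : m ∈ (["R","R'","L","L'","F","F'","B","B'"] : List String)
  · exact mapY_eq_lit m h y
  · -- m is none of the 8 keys: both sides return m
    have hA : mapY m y = m := by
      simp only [List.mem_cons, List.not_mem_nil, or_false, not_or] at h
      obtain ⟨h1, h2, h3, h4, h5, h6, h7, h8⟩ := h
      have hY : Ymap.items =
          [("R","B"),("R'","B'"),("L","F"),("L'","F'"),("F","R"),("F'","R'"),("B","L"),("B'","L'")] := by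
        decide
      have e1 : ("R" == m) = false := by simp [Ne.symm h1]
      have e2 : ("R'" == m) = false := by simp [Ne.symm h2]
      have e3 : ("L" == m) = false := by simp [Ne.symm h3]
      have e4 : ("L'" == m) = false := by simp [Ne.symm h4]
      have e5 : ("F" == m) = false := by simp [Ne.symm h5]
      have e6 : ("F'" == m) = false := by simp [Ne.symm h6]
      have e7 : ("B" == m) = false := by simp [Ne.symm h7]
      have e8 : ("B'" == m) = false := by simp [Ne.symm h8]
      have hnone : Ymap.get? m = none := by
        simp [PySem.Dict.get?, hY, List.find?, e1, e2, e3, e4, e5, e6, e7, e8]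
      simp [mapY, hnone]
    have hB : mapY_alt m y = m := by
      unfold mapY_alt
      rcases hcs : m.toList with _ | ⟨f, rest⟩
      · rfl
      · simp only []
        split_ifs with hg
        · exfalso
          obtain ⟨hf, hr⟩ := hg
          have hms : m = String.ofList (f :: rest) := by
            rw [← hcs, String.ofList_toList]
          apply h
          rw [hms]
          fin_cases hf <;> rcases hr with hr | hr <;> subst hr <;> decide
        · rfl
    rw [hA, hB]

-- ===== VERDICT (by name: the statement is the Claim_ definition above) =====
theorem remove_all_Y_spec : Claim_equal_remove_all_Y := by
  intro moves _
  unfold Spec_remove_all_Y remove_all_Y remove_all_Y_alt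
  rw [show mapY = mapY_alt from funext fun m => funext fun y => mapY_eq m y]
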